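-- pv_equiv track=rewrite | github.com/edgeverse/edgescale-cloud | services/functions/scale_other/utils.py | clock_time_filter
-- ===== SOURCE A (Python) =====
-- def clock_time_filter(records):
--     """
--     Fill zero if no data
--     """
--     for date, usage in list(records.items()):
--         not_access_hours = dict((str(k), 0) for k in range(24))
--         for resource in list(usage.keys()):
--             if not resource.isdigit():
--                 usage.pop(resource)
--             elif resource in not_access_hours:
--                 del not_access_hours[resource]
--
--         usage = dict(list(usage.items()) + list(not_access_hours.items()))
--         records[date] = usage
--
--     return records
-- ===== SOURCE B (Python) =====
-- def _fill(usage):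
--     kept = [(k, v) for k, v in usage.items() if k.isdigit()]
--     present = {k for k, _ in kept}
--     return dict(kept + [(str(h), 0) for h in range(24) if str(h) not in present])
--
--
-- def clock_time_filter(records):
--     """
--     Fill zero if no data
--     """
--     return {date: _fill(usage) for date, usage in records.items()}
-- ===== Notes on version B (the rewrite author's own statement) =====
-- stated objective: simpler
-- what changed: B drops A's build-24-zeros-dict / pop-and-delete-while-scanning / two-dict merge and instead assembles each day's result directly as the digit-keyed items followed by the missing canonical hours computed from a set of present keys, returning a fresh dict comprehension instead of mutating records in place (return value identical).
import Mathlib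
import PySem

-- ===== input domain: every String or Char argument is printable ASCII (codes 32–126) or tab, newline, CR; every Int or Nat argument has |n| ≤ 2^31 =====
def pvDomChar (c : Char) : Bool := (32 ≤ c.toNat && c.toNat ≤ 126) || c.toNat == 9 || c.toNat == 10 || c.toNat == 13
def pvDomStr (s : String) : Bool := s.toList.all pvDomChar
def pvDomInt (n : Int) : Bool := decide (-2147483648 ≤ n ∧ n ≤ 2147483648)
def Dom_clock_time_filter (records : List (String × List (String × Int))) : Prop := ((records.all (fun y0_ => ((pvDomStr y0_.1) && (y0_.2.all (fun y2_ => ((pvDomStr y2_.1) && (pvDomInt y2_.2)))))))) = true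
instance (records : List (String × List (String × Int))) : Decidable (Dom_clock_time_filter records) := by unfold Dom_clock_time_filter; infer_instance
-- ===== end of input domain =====

-- B assembles each day directly as digit-keyed items ++ missing canonical hours (via a set of present
-- keys) instead of A's zeros-dict / delete-while-scanning / merge (objective: simpler). Return-value
-- equivalence only: A mutates records and the inner usage dicts in place, B builds fresh dicts.

-- ===== PORT A =====
-- inner body of A's loop over records.items(); dicts are PySem.Dict (insertion order)
def pvFillA (usage0 : List (String × Int)) : List (String × Int) :=
  let u : PySem.Dict String Int := PySem.Dict.ofList usage0
  -- not_access_hours = dict((str(k), 0) for k in range(24))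
  let naH : PySem.Dict String Int :=
    (PySem.List.pyRange 0 24 1).foldl (fun d k => d.insert (PySem.Int.toStr k) (0 : Int)) PySem.Dict.empty
  -- for resource in list(usage.keys()): pop non-digit keys from usage, del digit keys from not_access_hours
  let st :=
    u.keys.foldl
      (fun (st : PySem.Dict String Int × PySem.Dict String Int) r =>
        if !(PySem.Str.strIsdigit r) then (st.1.erase r, st.2)
        else if st.2.contains r then (st.1, st.2.erase r)
        else st)
      (u, naH)
  -- usage = dict(list(usage.items()) + list(not_access_hours.items()))
  (PySem.Dict.ofList (st.1.items ++ st.2.items)).items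

-- records[date] = usage only rewrites keys that already exist, in place, so the loop
-- over list(records.items()) is a map over the dict's items.
def clock_time_filter (records : List (String × List (String × Int))) : List (String × List (String × Int)) :=
  (PySem.Dict.ofList records).items.map (fun p => (p.1, pvFillA p.2))

-- ===== PORT B =====
-- _fill: kept = digit-keyed items; present = {k for k, _ in kept}; dict(kept + missing canonical hours)
def pvFillB (usage0 : List (String × Int)) : List (String × Int) :=
  let kept : List (String × Int) :=
    (PySem.Dict.ofList usage0).items.filter (fun p => PySem.Str.strIsdigit p.1)
  let present : PySem.Set String := PySem.Set.ofList (kept.map (fun p => p.1))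
  let tail : List (String × Int) :=
    ((PySem.List.pyRange 0 24 1).filter
        (fun h => !(PySem.Set.contains present (PySem.Int.toStr h)))).map
      (fun h => (PySem.Int.toStr h, (0 : Int)))
  (PySem.Dict.ofList (kept ++ tail)).items

-- {date: _fill(usage) for date, usage in records.items()}
def clock_time_filter_alt (records : List (String × List (String × Int))) : List (String × List (String × Int)) :=
  (PySem.Dict.ofList records).items.map (fun p => (p.1, pvFillB p.2))

-- ===== PRECONDITION & SPEC =====
def Spec_clock_time_filter (records : List (String × List (String × Int))) (out : List (String × List (String × Int))) : Prop := out = clock_time_filter_alt records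
instance (records : List (String × List (String × Int))) (out : List (String × List (String × Int))) : Decidable (Spec_clock_time_filter records out) := by unfold Spec_clock_time_filter; infer_instance

-- ===== CLAIM (what is proved, stated in full; the proofs are below) =====
def Claim_equal_clock_time_filter : Prop := ∀ (records : List (String × List (String × Int))), Dom_clock_time_filter records → Spec_clock_time_filter records (clock_time_filter records)

-- ===== LEMMAS AND PROOFS =====

-- erasing an absent key is the identity
lemma pv_erase_of_not_contains (d : PySem.Dict String Int) (k : String) (h : d.contains k = false) :
    d.erase k = d := by
  apply PySem.Dict.ext
  simp only [PySem.Dict.erase]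
  apply List.filter_eq_self.mpr
  intro p hp
  simp only [PySem.Dict.contains, List.any_eq_false] at h
  simpa using h p hp

-- A's scan over the keys updates usage and not_access_hours independently
lemma pv_fold_split (rs : List String) (d1 d2 : PySem.Dict String Int) :
    rs.foldl
      (fun (st : PySem.Dict String Int × PySem.Dict String Int) r =>
        if !(PySem.Str.strIsdigit r) then (st.1.erase r, st.2)
        else if st.2.contains r then (st.1, st.2.erase r)
        else st)
      (d1, d2)
    = (rs.foldl (fun d r => if !(PySem.Str.strIsdigit r) then d.erase r else d) d1,
       rs.foldl (fun d r => if PySem.Str.strIsdigit r then d.erase r else d) d2) := by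
  induction rs generalizing d1 d2 with
  | nil => rfl
  | cons r rs ih =>
    rw [List.foldl_cons, List.foldl_cons, List.foldl_cons]
    cases hD : PySem.Str.strIsdigit r with
    | false =>
      simp only [Bool.not_false, reduceIte]
      exact ih (d1.erase r) d2
    | true =>
      simp only [Bool.not_true, reduceIte]
      by_cases hc : d2.contains r = true
      · rw [if_pos hc]
        exact ih d1 (d2.erase r)
      · rw [if_neg hc, pv_erase_of_not_contains d2 r (by simpa using hc)]
        exact ih d1 d2

-- a conditional-erase scan is one filter over the items
lemma pv_foldl_eraseIf_items (c : String → Bool) (rs : List String) (d : PySem.Dict String Int) :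
    (rs.foldl (fun d r => if c r then d.erase r else d) d).items
      = d.items.filter (fun p => !(c p.1 && decide (p.1 ∈ rs))) := by
  induction rs generalizing d with
  | nil => simp
  | cons r rs ih =>
    simp only [List.foldl_cons]
    by_cases hc : c r
    · rw [if_pos hc, ih]
      simp only [PySem.Dict.erase, List.filter_filter]
      apply List.filter_congr
      intro p _
      by_cases he : p.1 = r
      · simp [he, hc]
      · simp [he, List.mem_cons]
    · rw [if_neg hc, ih]
      apply List.filter_congr
      intro p _
      by_cases he : p.1 = r
      · simp [he, hc]
      · simp [he, List.mem_cons]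

-- membership among the kept (digit-keyed) items is 'digit and present'
lemma pv_kept_keys (u : PySem.Dict String Int) (s : String) :
    (s ∈ (u.items.filter (fun p => PySem.Str.strIsdigit p.1)).map (fun x => x.1))
      ↔ (PySem.Str.strIsdigit s = true ∧ s ∈ u.keys) := by
  simp only [List.mem_map, List.mem_filter, PySem.Dict.keys]
  constructor
  · rintro ⟨p, ⟨hp, hd⟩, he⟩
    exact ⟨he ▸ hd, ⟨p, hp, he⟩⟩
  · rintro ⟨hd, p, hp, he⟩
    exact ⟨p, ⟨hp, he ▸ hd⟩, he⟩

-- the per-date bodies agree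
lemma pv_fill_eq (xs : List (String × Int)) : pvFillA xs = pvFillB xs := by
  unfold pvFillA pvFillB
  simp only []
  set u : PySem.Dict String Int := PySem.Dict.ofList xs with hu
  set kept : List (String × Int) := u.items.filter (fun p => PySem.Str.strIsdigit p.1) with hkept
  -- A side: split the fold, turn each component into a filter
  rw [pv_fold_split, pv_foldl_eraseIf_items, pv_foldl_eraseIf_items]
  have huF : u.items.filter (fun p => !(!(PySem.Str.strIsdigit p.1) && decide (p.1 ∈ u.keys))) = kept := by
    rw [hkept]
    apply List.filter_congr
    intro p hp
    have : p.1 ∈ u.keys := List.mem_map.mpr ⟨p, hp, rfl⟩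
    simp [this]
  rw [huF]
  -- the zero dict's items
  have hnaH : ((PySem.List.pyRange 0 24 1).foldl
      (fun d k => d.insert (PySem.Int.toStr k) (0 : Int)) PySem.Dict.empty).items
      = (PySem.List.pyRange 0 24 1).map (fun k => (PySem.Int.toStr k, (0 : Int))) := by
    exact PySem.Dict.items_foldl_insert_fresh _ _ _ _
      (by intro a _; simp [PySem.Dict.contains_empty]) (by decide)
  rw [hnaH, List.filter_map]
  -- the two hour filters select the same hours
  have hfil : (PySem.List.pyRange 0 24 1).filter
        ((fun p => !(PySem.Str.strIsdigit p.1 && decide (p.1 ∈ u.keys))) ∘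
          (fun k => (PySem.Int.toStr k, (0 : Int))))
      = (PySem.List.pyRange 0 24 1).filter
        (fun h => !(PySem.Set.contains (PySem.Set.ofList (kept.map (fun p => p.1)))
                      (PySem.Int.toStr h))) := by
    apply List.filter_congr
    intro h _
    simp only [Function.comp_apply, Bool.not_inj_iff]
    rw [Bool.eq_iff_iff]
    simp only [Bool.and_eq_true, decide_eq_true_eq, PySem.Set.contains_iff,
      PySem.Set.mem_ofList]
    exact (pv_kept_keys u (PySem.Int.toStr h)).symm
  rw [hfil]

-- ===== VERDICT (by name: the statement is the Claim_ definition above) =====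
theorem clock_time_filter_spec : Claim_equal_clock_time_filter := by
  intro records _
  show clock_time_filter records = clock_time_filter_alt records
  unfold clock_time_filter clock_time_filter_alt
  exact List.map_congr_left (fun p _ => by rw [pv_fill_eq])
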